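-- pv_equiv track=rewrite | github.com/Kim-Young-Hoo/boj_algorithms | 백준/Gold/1083. 소트/소트.py | solution
-- ===== SOURCE A (Python) =====
-- def solution(n, lst, s):
--     for i in range(n):
--
--         if s > 0:
--             max_num = lst[i]
--             idx = i
--             for j in range(i, i + s + 1):
--                 if j < n and max_num < lst[j]:
--                     max_num = lst[j]
--                     idx = j
--             if idx != i:
--                 max_num = lst.pop(idx)
--                 lst.insert(i, max_num)
--                 s -= idx - i
--         else:
--             break
--
--     return ' '.join(map(str, lst))
-- ===== SOURCE B (Python) =====
-- def solution(n, lst, s):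
--     # Remainder-based greedy: repeatedly pull the leftmost maximum of the first s+1
--     # remaining elements to the output; no in-place pop/insert on the full list and
--     # no global index arithmetic.
--     # (A mutates lst in place; B does not -- equivalence is about the return value.)
--     k = min(max(n, 0), len(lst))
--     head, tail = lst[:k], lst[k:]
--     out = []
--     while s > 0 and head:
--         w = head[:s + 1]
--         m = max(w)
--         j = w.index(m)
--         out.append(m)
--         head = w[:j] + w[j + 1:] + head[s + 1:]
--         s -= j
--     return ' '.join(map(str, out + head + tail))
-- ===== Notes on version B (the rewrite author's own statement) =====
-- stated objective: simpler
-- what changed: Replaces A's in-place pop/insert loop with global index arithmetic by a remainder-based greedy: repeatedly take the leftmost maximum of the first s+1 remaining elements into an output accumulator; no mutation of lst, no index bookkeeping over the full list.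
-- outside the precondition, e.g. on solution(4, [1, 2, 3], 1): A returns '2 1 3', B returns '2 1 3'; on solution(3, [5, 1], 2): A raises IndexError, B returns '5 1'
import Mathlib
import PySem

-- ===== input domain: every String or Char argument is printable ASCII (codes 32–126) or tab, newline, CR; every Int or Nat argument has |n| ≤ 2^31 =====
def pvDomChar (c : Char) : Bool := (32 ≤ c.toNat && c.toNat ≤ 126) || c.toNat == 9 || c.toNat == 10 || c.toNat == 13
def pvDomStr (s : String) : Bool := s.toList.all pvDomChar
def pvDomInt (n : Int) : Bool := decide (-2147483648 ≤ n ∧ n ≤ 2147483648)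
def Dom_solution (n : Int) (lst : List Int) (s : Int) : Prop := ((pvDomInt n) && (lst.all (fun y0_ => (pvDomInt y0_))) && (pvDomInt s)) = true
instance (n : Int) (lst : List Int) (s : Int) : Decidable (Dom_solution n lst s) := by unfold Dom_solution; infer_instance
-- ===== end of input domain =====

-- B replaces A's in-place pop/insert loop by a remainder-based greedy loop (simpler; same
-- asymptotics). A mutates lst in place, B does not: the equivalence proved is about the return value.

-- ===== PORT A =====
-- inner 'for j in range(i, i+s+1)' scan for the window maximum and its index.
-- lst[j] / lst[i] are ported with pyGetD: Python raises IndexError exactly where the index is out of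
-- range, which Pre_solution excludes (under Pre_ every access here is in range).
def innerScan (lst : List Int) (n : Int) (i : Int) (s : Int) : Int × Int :=
  (PySem.List.pyRange i (i + s + 1) 1).foldl
    (fun (p : Int × Int) j =>
      if j < n then
        (if p.1 < PySem.List.pyGetD lst j 0 then (PySem.List.pyGetD lst j 0, j) else p)
      else p)
    (PySem.List.pyGetD lst i 0, i)

-- outer 'for i in range(n)' with the 'break' on s ≤ 0, as counter recursion: i is the loop
-- index, the structural fuel n.toNat counts the remaining iterations of range(n);
-- lst.pop(idx) / lst.insert(i, v) via PySem
def aLoop : Nat → Int → Int → List Int → Int → List Int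
  | 0, _, _, lst, _ => lst
  | fuel + 1, i, n, lst, s =>
    if 0 < s then
      let p := innerScan lst n i s
      if p.2 ≠ i then
        match PySem.List.pop? lst p.2 with
        | some (v, lst') => aLoop fuel (i + 1) n (PySem.List.insert lst' i v) (s - (p.2 - i))
        | none => lst   -- unreachable under Pre_solution: Python raises IndexError here
      else aLoop fuel (i + 1) n lst s
    else lst

def solution (n : Int) (lst : List Int) (s : Int) : String :=
  PySem.Str.join " " ((aLoop n.toNat 0 n lst s).map PySem.Int.toStr)

-- ===== PORT B =====
-- 'while s > 0 and head': pull the leftmost maximum of the first s+1 remaining elements to the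
-- output accumulator.  Source B's loop removes exactly one element of head per iteration; the fuel
-- argument, initialised to head.length, is only Lean's structural bound for that same loop.
def arrangeF : Nat → List Int → Int → List Int → List Int
  | 0, head, _, out => out ++ head
  | fuel + 1, head, s, out =>
    if 0 < s ∧ head ≠ [] then
      let w := head.take (s + 1).toNat
      let m := (PySem.List.max? w (fun y => y)).getD 0
      let j := (PySem.List.index? w m).getD 0
      arrangeF fuel (w.take j ++ w.drop (j + 1) ++ head.drop (s + 1).toNat) (s - j) (out ++ [m])
    else out ++ head

def arrange (head : List Int) (s : Int) : List Int := arrangeF head.length head s []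

def solution_alt (n : Int) (lst : List Int) (s : Int) : String :=
  let k := min (max n 0) (lst.length : Int)
  let head := PySem.List.slice lst none (some k)
  let tail := PySem.List.slice lst (some k) none
  PySem.Str.join " " ((arrange head s ++ tail).map PySem.Int.toStr)

-- ===== PRECONDITION & SPEC =====
-- Pre_ excludes n greater than the list length together with positive s: there A indexes past the
-- end of lst and raises IndexError on almost all such inputs; on the few where the swap budget runs
-- out before the overrun A returns, and B returns the same string (see the cites in the claim).
def Pre_solution (n : Int) (lst : List Int) (s : Int) : Prop := n ≤ lst.length ∨ s ≤ 0
instance (n : Int) (lst : List Int) (s : Int) : Decidable (Pre_solution n lst s) := by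
  unfold Pre_solution; infer_instance

def pvWitness_solution : Int × List Int × Int := (3, ([2, 8, 1] : List Int), 2)

def Spec_solution (n : Int) (lst : List Int) (s : Int) (out : String) : Prop := out = solution_alt n lst s
instance (n : Int) (lst : List Int) (s : Int) (out : String) : Decidable (Spec_solution n lst s out) := by unfold Spec_solution; infer_instance

-- ===== CLAIM (what is proved, stated in full; the proofs are below) =====
def Claim_equal_solution : Prop := ∀ (n : Int) (lst : List Int) (s : Int), Dom_solution n lst s → Pre_solution n lst s → Spec_solution n lst s (solution n lst s)

-- ===== LEMMAS AND PROOFS =====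

-- (max of a nonempty list, index of its leftmost occurrence), by structural recursion
def lm : List Int → Int × Nat
  | [] => (0, 0)
  | [x] => (x, 0)
  | x :: y :: t => let p := lm (y :: t); if x < p.1 then (p.1, p.2 + 1) else (x, 0)

theorem lm1_cons (x y : Int) (t : List Int) :
    (lm (x :: y :: t)).1 = max x (lm (y :: t)).1 := by
  simp only [lm]; split <;> simp <;> omega

theorem lm2_cons (x y : Int) (t : List Int) :
    (lm (x :: y :: t)).2 = if x < (lm (y :: t)).1 then (lm (y :: t)).2 + 1 else 0 := by
  simp only [lm]; split <;> simp_all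

theorem lm_idx_lt (w : List Int) (hw : w ≠ []) : (lm w).2 < w.length := by
  induction w with
  | nil => exact absurd rfl hw
  | cons x t ih =>
    cases t with
    | nil => simp [lm]
    | cons y t' =>
      have := ih (by simp)
      rw [lm2_cons]
      split <;> simp_all <;> omega

theorem lm_get (w : List Int) (hw : w ≠ []) : w.getD (lm w).2 0 = (lm w).1 := by
  induction w with
  | nil => exact absurd rfl hw
  | cons x t ih =>
    cases t with
    | nil => simp [lm]
    | cons y t' =>
      have := ih (by simp)
      rw [lm1_cons, lm2_cons]
      split <;> simp_all <;> omega

theorem lm_foldl_max (t : List Int) (x : Int) :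
    t.foldl max x = if t = [] then x else max x (lm t).1 := by
  induction t generalizing x with
  | nil => simp
  | cons y t' ih =>
    rw [List.foldl_cons, ih]
    cases t' with
    | nil => simp [lm]
    | cons z t'' =>
      simp only [List.cons_ne_nil, if_false, lm1_cons, reduceCtorEq]
      omega

theorem lm_max? (w : List Int) (hw : w ≠ []) :
    PySem.List.max? w (fun y => y) = some (lm w).1 := by
  obtain ⟨x, t, rfl⟩ := List.exists_cons_of_ne_nil hw
  rw [PySem.List.max?_id_cons, lm_foldl_max]
  cases t with
  | nil => simp [lm]
  | cons y t' => simp [lm1_cons]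

theorem lm_index? (w : List Int) (hw : w ≠ []) :
    PySem.List.index? w (lm w).1 = some (lm w).2 := by
  induction w with
  | nil => exact absurd rfl hw
  | cons x t ih =>
    cases t with
    | nil => simp [lm, PySem.List.index?_cons_self]
    | cons y t' =>
      rw [lm1_cons, lm2_cons]
      by_cases hlt : x < (lm (y :: t')).1
      · rw [if_pos hlt, max_eq_right (le_of_lt hlt),
          PySem.List.index?_cons_of_ne _ (ne_of_lt hlt), ih (by simp)]
        rfl
      · rw [if_neg hlt, max_eq_left (by omega)]
        exact PySem.List.index?_cons_self _ _

theorem lm_head_max (w : List Int) (hw : w ≠ []) (h : (lm w).1 ≤ w.getD 0 0) :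
    lm w = (w.getD 0 0, 0) := by
  obtain ⟨x, t, rfl⟩ := List.exists_cons_of_ne_nil hw
  cases t with
  | nil => simp [lm]
  | cons y t' =>
    rw [List.getD_cons_zero] at h ⊢
    rw [lm1_cons] at h
    have hnlt : ¬ x < (lm (y :: t')).1 := by omega
    refine Prod.ext ?_ ?_
    · rw [lm1_cons]; omega
    · rw [lm2_cons, if_neg hnlt]

-- getD through append / take (small closed facts about this file's decompositions)
theorem getD_app_left (l l' : List Int) (k : Nat) (h : k < l.length) :
    (l ++ l').getD k 0 = l.getD k 0 := by
  simp [List.getD, List.getElem?_append_left h]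

theorem getD_take' (l : List Int) (L k : Nat) (h : k < L) :
    (l.take L).getD k 0 = l.getD k 0 := by
  simp [List.getD, h]

-- A's inner scan from an arbitrary accumulator, over positions b, b+1, …
theorem scanLM (t : List Int) (m q b : Int) :
    (List.range t.length).foldl
      (fun (p : Int × Int) k => if p.1 < t.getD k 0 then (t.getD k 0, b + (k : Int)) else p) (m, q)
    = if t = [] then (m, q)
      else (if m < (lm t).1 then ((lm t).1, b + ((lm t).2 : Int)) else (m, q)) := by
  induction t generalizing m q b with
  | nil => simp
  | cons x t' ih =>
    rw [show (x :: t').length = t'.length + 1 from rfl, List.range_succ_eq_map,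
      List.foldl_cons, List.foldl_map]
    have hsh : ∀ (k : Nat), b + ((k : Int) + 1) = (b + 1) + (k : Int) := fun k => by ring
    simp only [List.getD_cons_succ, List.getD_cons_zero, Nat.cast_zero, add_zero,
      Nat.succ_eq_add_one, Nat.cast_add, Nat.cast_one, hsh]
    by_cases hmx : m < x
    · rw [if_pos hmx, ih]
      cases t' with
      | nil => simp [lm, hmx]
      | cons y t'' =>
        simp only [List.cons_ne_nil, if_false, lm1_cons, lm2_cons, reduceCtorEq]
        split_ifs <;> simp_all [Prod.ext_iff] <;> push_cast <;> omega
    · rw [if_neg hmx, ih]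
      cases t' with
      | nil => simp [lm, hmx]
      | cons y t'' =>
        simp only [List.cons_ne_nil, if_false, lm1_cons, lm2_cons, reduceCtorEq]
        split_ifs <;> simp_all [Prod.ext_iff] <;> push_cast <;> omega

-- the closed form of A's inner scan over a nonempty window, seeded with the window's head
theorem scan_closed (w : List Int) (hw : w ≠ []) (b : Int) :
    (List.range w.length).foldl
      (fun (p : Int × Int) k => if p.1 < w.getD k 0 then (w.getD k 0, b + (k : Int)) else p)
      (w.getD 0 0, b)
    = ((lm w).1, b + ((lm w).2 : Int)) := by
  rw [scanLM, if_neg hw]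
  by_cases hc : w.getD 0 0 < (lm w).1
  · rw [if_pos hc]
  · rw [if_neg hc, lm_head_max w hw (by omega)]
    simp

-- indexing into an appended list at offset pre.length + k
theorem pyGetD_append_cast (pre ys : List Int) (k : Nat) :
    PySem.List.pyGetD (pre ++ ys) ((pre.length : Int) + (k : Int)) 0 = ys.getD k 0 := by
  have h : PySem.List.pyGet? (pre ++ ys) ((pre.length : Int) + (k : Int)) = ys[k]? :=
    PySem.List.pyGet?_append_right pre ys k
  simp [PySem.List.pyGetD, h, List.getD]

-- characterization of A's inner scan on the decomposed list
theorem innerScan_spec (done head tail : List Int) (s : Int) (hs : 0 < s) (hh : head ≠ []) :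
    innerScan (done ++ (head ++ tail)) ((done.length : Int) + (head.length : Int))
        (done.length : Int) s
      = ((lm (head.take (s + 1).toNat)).1,
         (done.length : Int) + ((lm (head.take (s + 1).toNat)).2 : Int)) := by
  unfold innerScan
  have h1 : (done.length : Int) + s + 1 - (done.length : Int) = s + 1 := by ring
  rw [PySem.List.pyRange_one, h1, List.foldl_map]
  have hinit : PySem.List.pyGetD (done ++ (head ++ tail)) ((done.length : Int)) 0
      = head.getD 0 0 := by
    have h0 := pyGetD_append_cast done (head ++ tail) 0
    obtain ⟨x, t, rfl⟩ := List.exists_cons_of_ne_nil hh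
    simpa using h0
  rw [hinit]
  have hF : (fun (p : Int × Int) (k : Nat) =>
        if (done.length : Int) + (k : Int) < (done.length : Int) + (head.length : Int) then
          (if p.1 < PySem.List.pyGetD (done ++ (head ++ tail)) ((done.length : Int) + (k : Int)) 0
            then (PySem.List.pyGetD (done ++ (head ++ tail)) ((done.length : Int) + (k : Int)) 0,
              (done.length : Int) + (k : Int))
            else p)
        else p)
      = (fun (p : Int × Int) (k : Nat) =>
        if k < head.length then
          (if p.1 < head.getD k 0 then (head.getD k 0, (done.length : Int) + (k : Int)) else p)
        else p) := by
    funext p k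
    by_cases hk : k < head.length
    · rw [if_pos (by push_cast; omega), if_pos hk, pyGetD_append_cast, getD_app_left _ _ _ hk]
    · rw [if_neg (by push_cast; omega), if_neg hk]
  rw [hF]
  by_cases hL : (s + 1).toNat ≤ head.length
  · -- window shorter than the remainder: the guard is always true, restrict to head.take L
    set L := (s + 1).toNat with hLdef
    have hW : (head.take L).length = L := by simp [List.length_take]; omega
    have hG : ∀ (p : Int × Int) (k : Nat), k ∈ List.range L →
        (if k < head.length then
          (if p.1 < head.getD k 0 then (head.getD k 0, (done.length : Int) + (k : Int)) else p)
         else p)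
        = (if p.1 < (head.take L).getD k 0
            then ((head.take L).getD k 0, (done.length : Int) + (k : Int)) else p) := by
      intro p k hk
      rw [List.mem_range] at hk
      rw [if_pos (by omega), getD_take' _ _ _ (by omega)]
    rw [PySem.List.foldl_congr_mem (h := hG)]
    rw [show head.getD 0 0 = (head.take L).getD 0 0 from (getD_take' _ _ _ (by omega)).symm]
    rw [show List.range L = List.range (head.take L).length by rw [hW]]
    exact scan_closed _ (by simp [List.take_eq_nil_iff, hh]; omega) _
  · -- window covers the whole remainder: head.take L = head, trailing indices are dead
    rw [List.take_of_length_le (by omega)]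
    rw [show (s + 1).toNat = head.length + ((s + 1).toNat - head.length) by omega,
      List.range_add, List.foldl_append]
    have hG : ∀ (p : Int × Int) (k : Nat), k ∈ List.range head.length →
        (if k < head.length then
          (if p.1 < head.getD k 0 then (head.getD k 0, (done.length : Int) + (k : Int)) else p)
         else p)
        = (if p.1 < head.getD k 0 then (head.getD k 0, (done.length : Int) + (k : Int)) else p) := by
      intro p k hk
      rw [List.mem_range] at hk
      rw [if_pos hk]
    rw [PySem.List.foldl_congr_mem (h := hG), scan_closed head hh]
    have hG2 : ∀ (p : Int × Int) (k : Nat),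
        k ∈ (List.range ((s + 1).toNat - head.length)).map (head.length + ·) →
        (if k < head.length then
          (if p.1 < head.getD k 0 then (head.getD k 0, (done.length : Int) + (k : Int)) else p)
         else p)
        = p := by
      intro p k hk
      simp only [List.mem_map, List.mem_range] at hk
      obtain ⟨a, -, rfl⟩ := hk
      rw [if_neg (by omega)]
    rw [PySem.List.foldl_congr_mem (h := hG2), PySem.List.foldl_ignore]

-- list algebra: removing the chosen element from the window IS eraseIdx on the remainder
theorem window_erase (head : List Int) (L j : Nat) (hj1 : j + 1 ≤ (head.take L).length) :
    (head.take L).take j ++ (head.take L).drop (j + 1) ++ head.drop L = head.eraseIdx j := by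
  have hjL : j + 1 ≤ L := le_trans hj1 (by simp [List.length_take])
  rw [List.take_take, min_eq_left (by omega), List.drop_take,
    List.eraseIdx_eq_take_drop_succ, List.append_assoc]
  congr 1
  rw [show head.drop L = (head.drop (j + 1)).drop (L - (j + 1)) by
      rw [List.drop_drop]; congr 1; omega]
  exact List.take_append_drop _ _

theorem arrange_nil (s : Int) : arrange [] s = [] := rfl

theorem arrangeF_nonpos (fuel : Nat) (head out : List Int) (s : Int) (hs : s ≤ 0) :
    arrangeF fuel head s out = out ++ head := by
  cases fuel with
  | zero => rfl
  | succ f =>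
    simp only [arrangeF]
    rw [if_neg (fun h => absurd h.1 (by omega))]

theorem arrange_nonpos (head : List Int) (s : Int) (hs : s ≤ 0) : arrange head s = head := by
  rw [arrange, arrangeF_nonpos _ _ _ _ hs, List.nil_append]

-- the loop's accumulator splits off
theorem arrangeF_acc (fuel : Nat) (head out : List Int) (s : Int) :
    arrangeF fuel head s out = out ++ arrangeF fuel head s [] := by
  induction fuel generalizing head out s with
  | zero => simp [arrangeF]
  | succ fuel ih =>
    simp only [arrangeF]
    by_cases hg : 0 < s ∧ head ≠ []
    · rw [if_pos hg, if_pos hg, ih, ih (out := [] ++ [_]), List.nil_append, List.append_assoc]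
    · rw [if_neg hg, if_neg hg, List.nil_append]

-- one step of B's recursion, in the form the main induction uses
theorem arrange_step (head : List Int) (s : Int) (hs : 0 < s) (hh : head ≠ []) :
    arrange head s
      = (lm (head.take (s + 1).toNat)).1
          :: arrange (head.eraseIdx (lm (head.take (s + 1).toNat)).2)
               (s - ((lm (head.take (s + 1).toNat)).2 : Int)) := by
  have hw : head.take (s + 1).toNat ≠ [] := by
    simp [List.take_eq_nil_iff, hh]; omega
  have hj := lm_idx_lt _ hw
  have hJh : (lm (head.take (s + 1).toNat)).2 < head.length :=
    lt_of_lt_of_le hj (by simp [List.length_take])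
  obtain ⟨L', hL'⟩ : ∃ L', head.length = L' + 1 := by
    cases head with
    | nil => exact absurd rfl hh
    | cons a t => exact ⟨t.length, rfl⟩
  unfold arrange
  rw [hL']
  simp only [arrangeF]
  rw [if_pos ⟨hs, hh⟩]
  simp only [lm_max? _ hw, Option.getD_some, lm_index? _ hw]
  rw [window_erase head _ _ (by omega)]
  have hX : (head.eraseIdx (lm (head.take (s + 1).toNat)).2).length = L' := by
    rw [List.length_eraseIdx]; simp [hJh]; omega
  rw [hX, arrangeF_acc, List.nil_append, List.singleton_append]

-- A's outer loop returns lst unchanged when the budget is exhausted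
theorem aLoop_nonpos (fuel : Nat) (i n : Int) (lst : List Int) (s : Int) (hs : s ≤ 0) :
    aLoop fuel i n lst s = lst := by
  cases fuel with
  | zero => rfl
  | succ f => simp only [aLoop]; rw [if_neg (by omega)]

-- the main induction: A's loop on done ++ head ++ tail equals done ++ B's arrange head ++ tail
theorem aLoop_arrange (fuel : Nat) (done head tail : List Int) (s : Int)
    (hf : head.length = fuel) :
    aLoop fuel (done.length : Int) ((done.length : Int) + (head.length : Int))
        (done ++ (head ++ tail)) s
      = done ++ (arrange head s ++ tail) := by
  induction fuel generalizing done head s with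
  | zero =>
    have hnil : head = [] := List.eq_nil_iff_length_eq_zero.mpr hf
    subst hnil
    rw [arrange_nil]
    rfl
  | succ fuel ih =>
    have hne : head ≠ [] := by intro h; rw [h] at hf; simp at hf
    by_cases hs : 0 < s
    · simp only [aLoop]
      rw [if_pos hs, innerScan_spec done head tail s hs hne]
      set w := head.take (s + 1).toNat with hwdef
      have hw : w ≠ [] := by rw [hwdef]; simp [List.take_eq_nil_iff, hne]; omega
      have hJw := lm_idx_lt w hw
      have hJ : (lm w).2 < head.length := by
        have : w.length ≤ head.length := by rw [hwdef]; simp [List.length_take]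
        omega
      by_cases hz : (lm w).2 = 0
      · -- leftmost maximum already in place: A makes no move
        rw [if_neg (by simp [hz])]
        obtain ⟨x, t, rfl⟩ := List.exists_cons_of_ne_nil hne
        have hx : (lm w).1 = x := by
          have hg := lm_get w hw
          rw [hz] at hg
          rw [← hg, hwdef, getD_take' _ _ _ (by omega), List.getD_cons_zero]
        rw [arrange_step _ _ hs hne, ← hwdef, hx, hz]
        simp only [List.eraseIdx_cons_zero, Nat.cast_zero, sub_zero]
        have hIH := ih (done ++ [x]) t s (by simpa using hf)
        have e1 : (((done ++ [x]).length : Nat) : Int) = (done.length : Int) + 1 := by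
          simp
        rw [e1] at hIH
        have e2 : ((x :: t).length : Int) = (t.length : Int) + 1 := by push_cast [List.length_cons]; ring
        rw [e2]
        have e3 : (done.length : Int) + ((t.length : Int) + 1)
            = (done.length : Int) + 1 + (t.length : Int) := by ring
        rw [e3]
        simp only [List.append_assoc, List.singleton_append, List.cons_append] at hIH ⊢
        exact hIH
      · -- A pops the maximum at done.length + J and reinserts it at done.length
        rw [if_pos (by
          intro h
          apply hz
          have h2 : ((lm w).2 : Int) = 0 := by omega
          exact_mod_cast h2)]
        have hidx : (done.length : Int) + ((lm w).2 : Int)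
            = ((done.length + (lm w).2 : Nat) : Int) := by push_cast; ring
        rw [hidx]
        rw [show ((lm w).1, ((done.length + (lm w).2 : Nat) : Int)).2
            = ((done.length + (lm w).2 : Nat) : Int) from rfl]
        have hlen : done.length + (lm w).2 < (done ++ (head ++ tail)).length := by
          simp [List.length_append]; omega
        rw [PySem.List.pop?_natCast _ _ hlen]
        show aLoop fuel ((done.length : Int) + 1)
            ((done.length : Int) + (head.length : Int))
            (PySem.List.insert ((done ++ (head ++ tail)).eraseIdx (done.length + (lm w).2))
              ((done.length : Int)) ((done ++ (head ++ tail))[done.length + (lm w).2]'hlen))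
            (s - (((done.length + (lm w).2 : Nat) : Int) - (done.length : Int)))
          = done ++ (arrange head s ++ tail)
        have hwL : w.length ≤ (s + 1).toNat := by rw [hwdef]; simp [List.length_take]
        have hg2 : head.getD (lm w).2 0 = (lm w).1 := by
          rw [← getD_take' head (s + 1).toNat _ (by omega), ← hwdef]
          exact lm_get w hw
        have hget : (done ++ (head ++ tail))[done.length + (lm w).2]'hlen = (lm w).1 := by
          rw [List.getElem_append_right (by omega)]
          simp only [Nat.add_sub_cancel_left]
          rw [List.getElem_append_left hJ, ← hg2]
          simp [List.getD, List.getElem?_eq_getElem hJ]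
        rw [hget]
        have hErase : (done ++ (head ++ tail)).eraseIdx (done.length + (lm w).2)
            = done ++ ((head.eraseIdx (lm w).2) ++ tail) := by
          rw [List.eraseIdx_append_of_length_le (by omega), Nat.add_sub_cancel_left,
            List.eraseIdx_append_of_lt_length hJ]
        rw [hErase]
        have hIns : PySem.List.insert (done ++ ((head.eraseIdx (lm w).2) ++ tail))
            ((done.length : Int)) ((lm w).1)
            = done ++ (((lm w).1 :: (head.eraseIdx (lm w).2 ++ tail))) := by
          rw [show ((done.length : Int)) = ((done.length : Nat) : Int) from rfl,
            PySem.List.insert_natCast _ _ _ (by simp [List.length_append]),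
            List.take_left, List.drop_left]
        rw [hIns]
        have hsub : s - (((done.length + (lm w).2 : Nat) : Int) - (done.length : Int))
            = s - ((lm w).2 : Int) := by push_cast; ring
        rw [hsub]
        have hIH := ih (done ++ [(lm w).1]) (head.eraseIdx (lm w).2) (s - ((lm w).2 : Int))
          (by rw [List.length_eraseIdx]; simp [hJ]; omega)
        have e1 : (((done ++ [(lm w).1]).length : Nat) : Int) = (done.length : Int) + 1 := by
          simp
        rw [e1] at hIH
        have e2 : ((head.eraseIdx (lm w).2).length : Int) = (head.length : Int) - 1 := by
          rw [List.length_eraseIdx]; simp only [hJ, if_pos]; push_cast [Nat.cast_sub (by omega : 1 ≤ head.length)]; ring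
        rw [e2] at hIH
        have e3 : (done.length : Int) + 1 + ((head.length : Int) - 1)
            = (done.length : Int) + (head.length : Int) := by ring
        rw [e3] at hIH
        rw [arrange_step _ _ hs hne, ← hwdef]
        simp only [List.append_assoc, List.singleton_append, List.cons_append] at hIH ⊢
        exact hIH
    · simp only [aLoop]
      rw [if_neg hs, arrange_nonpos head s (by omega)]

-- ===== VERDICT (by name: the statement is the Claim_ definition above) =====
theorem solution_spec : Claim_equal_solution := by
  unfold Claim_equal_solution
  intro n lst s _ hpre
  simp only [Spec_solution, solution, solution_alt]
  by_cases hs : s ≤ 0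
  · rw [aLoop_nonpos _ _ _ _ _ hs, arrange_nonpos _ _ hs]
    have hk : (0 : Int) ≤ min (max n 0) (lst.length : Int) := by omega
    rw [PySem.List.slice_to lst hk, PySem.List.slice_from lst hk, List.take_append_drop]
  · have hn : n ≤ (lst.length : Int) := hpre.resolve_right hs
    by_cases hn0 : n ≤ 0
    · rw [show n.toNat = 0 by omega]
      have hk : min (max n 0) (lst.length : Int) = 0 := by omega
      rw [hk, PySem.List.slice_to lst (le_refl 0), PySem.List.slice_from lst (le_refl 0)]
      simp [aLoop, arrange_nil]
    · have h0n : (0 : Int) ≤ n := by omega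
      have hk : min (max n 0) (lst.length : Int) = n := by omega
      rw [hk, PySem.List.slice_to lst h0n, PySem.List.slice_from lst h0n]
      have hlen : (((lst.take n.toNat).length : Nat) : Int) = n := by
        simp [List.length_take]; omega
      have htk : (lst.take n.toNat).length = n.toNat := by
        simp [List.length_take]; omega
      have hfin : aLoop n.toNat 0 n lst s
          = arrange (lst.take n.toNat) s ++ lst.drop n.toNat := by
        have h := aLoop_arrange (lst.take n.toNat).length [] (lst.take n.toNat)
          (lst.drop n.toNat) s rfl
        simp only [List.length_nil, Nat.cast_zero, zero_add, List.nil_append] at h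
        rw [hlen, List.take_append_drop, htk] at h
        exact h
      rw [hfin]
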